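-- pv_equiv track=rewrite | github.com/Birkinshaw/AF3_scripts | membranes/lipids/process_GRADEtoAF3_cif.py | remove_before_second_table
-- ===== SOURCE A (Python) =====
-- def remove_before_second_table(content):
--     # Initialize variables
--     table_count = 0
--     output_content = []
--     in_table = False
--
--     # Iterate through the content
--     for line in content:
--         if line.startswith('loop_'):
--             table_count += 1
--             in_table = True
--         if table_count >= 2:
--             output_content.append(line)
--         elif in_table and table_count == 1:
--             continue  # Skip lines of the first table
--
--     return output_content
-- ===== SOURCE B (Python) =====
-- def remove_before_second_table(content):
--     count = 0
--     for i, line in enumerate(content):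
--         if line.startswith('loop_'):
--             count += 1
--             if count == 2:
--                 return list(content[i:])
--     return []
-- ===== Notes on version B (the rewrite author's own statement) =====
-- stated objective: simpler
-- what changed: Instead of accumulating each kept line with a counter and an in_table flag, B scans only for the index of the second 'loop_' line and returns the slice from there (an empty list when there is no second table).
import Mathlib
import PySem

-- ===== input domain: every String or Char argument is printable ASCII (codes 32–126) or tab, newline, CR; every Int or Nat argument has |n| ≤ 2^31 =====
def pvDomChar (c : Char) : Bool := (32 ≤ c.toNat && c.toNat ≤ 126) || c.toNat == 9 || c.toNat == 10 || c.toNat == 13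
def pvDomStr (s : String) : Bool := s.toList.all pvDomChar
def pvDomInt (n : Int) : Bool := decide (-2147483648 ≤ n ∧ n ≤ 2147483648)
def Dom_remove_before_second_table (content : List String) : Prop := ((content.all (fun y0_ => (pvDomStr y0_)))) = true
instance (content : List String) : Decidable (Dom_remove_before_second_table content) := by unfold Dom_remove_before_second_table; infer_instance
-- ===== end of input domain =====

-- B finds the index of the second 'loop_' line and returns the slice from there ([] if none),
-- replacing A's per-line accumulator with counter and in_table flag. Objective: simpler.

-- ===== PORT A =====
-- state: (table_count, output_content, in_table)
def rbstStepA (st : Int × List String × Bool) (line : String) : Int × List String × Bool :=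
  let st1 := if PySem.Str.startswith line "loop_" then (st.1 + 1, st.2.1, true) else st
  if st1.1 ≥ 2 then (st1.1, st1.2.1 ++ [line], st1.2.2) else st1

def remove_before_second_table (content : List String) : List String :=
  (content.foldl rbstStepA (0, [], false)).2.1

-- ===== PORT B =====
def rbstGo (count : Int) (lines : List String) : List String :=
  match lines with
  | [] => []
  | l :: rest =>
    if PySem.Str.startswith l "loop_" then
      if count + 1 = 2 then l :: rest else rbstGo (count + 1) rest
    else rbstGo count rest

def remove_before_second_table_alt (content : List String) : List String :=
  rbstGo 0 content

-- ===== PRECONDITION & SPEC =====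
def Spec_remove_before_second_table (content : List String) (out : List String) : Prop := out = remove_before_second_table_alt content
instance (content : List String) (out : List String) : Decidable (Spec_remove_before_second_table content out) := by unfold Spec_remove_before_second_table; infer_instance

-- ===== CLAIM (what is proved, stated in full; the proofs are below) =====
def Claim_equal_remove_before_second_table : Prop := ∀ (content : List String), Dom_remove_before_second_table content → Spec_remove_before_second_table content (remove_before_second_table content)

-- ===== LEMMAS AND PROOFS =====

-- Once the counter has reached 2, A appends every remaining line.
theorem rbst_foldA_ge2 (lines : List String) (c : Int) (out : List String) (t : Bool) (h : 2 ≤ c) :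
    (lines.foldl rbstStepA (c, out, t)).2.1 = out ++ lines := by
  induction lines generalizing c out t with
  | nil => simp
  | cons l rest ih =>
    simp only [List.foldl_cons, rbstStepA, PySem.Str.startswith]
    by_cases ht : PySem.Chars.startswith l.toList ['l','o','o','p','_'] = true
    · simp [ht, show (2:Int) ≤ c + 1 by omega]
      simpa using ih (c + 1) (out ++ [l]) true (by omega)
    · simp [ht, h, ih c (out ++ [l]) t h]

-- While the counter is 0 or 1, A's fold agrees with B's cut-point scan.
theorem rbst_foldA_lt2 (lines : List String) (c : Int) (out : List String) (t : Bool)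
    (h : c = 0 ∨ c = 1) :
    (lines.foldl rbstStepA (c, out, t)).2.1 = out ++ rbstGo c lines := by
  induction lines generalizing c out t with
  | nil => simp [rbstGo]
  | cons l rest ih =>
    simp only [List.foldl_cons, rbstGo, rbstStepA, PySem.Str.startswith]
    by_cases ht : PySem.Chars.startswith l.toList ['l','o','o','p','_'] = true
    · rcases h with h | h
      · subst h; simp [ht, ih 1 out true (Or.inr rfl)]
      · subst h; simp [ht, rbst_foldA_ge2 rest 2 (out ++ [l]) true (by omega)]
    · rcases h with h | h <;> subst h <;>
        simp [ht, ih 0 out t (Or.inl rfl), ih 1 out t (Or.inr rfl)]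

-- ===== VERDICT (by name: the statement is the Claim_ definition above) =====
theorem remove_before_second_table_spec : Claim_equal_remove_before_second_table := by
  intro content _
  show _ = _
  simpa [remove_before_second_table, remove_before_second_table_alt] using
    rbst_foldA_lt2 content 0 [] false (Or.inl rfl)
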